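-- pv_equiv track=rewrite | github.com/menglingying/Electric-vehicle-rental-installment-platform | deploy/aliyun/deploy.py | format_env
-- ===== SOURCE A (Python) =====
-- def format_env(env: dict[str, str]) -> str:
--     preferred_order = [
--         "MYSQL_ROOT_PASSWORD",
--         "APP_ADMIN_USERNAME",
--         "APP_ADMIN_PASSWORD",
--         "JAVA_TOOL_OPTIONS",
--         "APP_AUTH_FIXED_CODE_WHITELIST_PHONES",
--         "APP_UPLOAD_DIR",
--         "EVLEASE_MYSQL_IMAGE",
--         "EVLEASE_NGINX_IMAGE",
--         "EVLEASE_JRE_IMAGE",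
--     ]
--
--     lines: list[str] = []
--     seen: set[str] = set()
--     for k in preferred_order:
--         if k in env:
--             lines.append(f"{k}={env[k]}")
--             seen.add(k)
--
--     for k in sorted(env.keys()):
--         if k in seen:
--             continue
--         lines.append(f"{k}={env[k]}")
--
--     return "\n".join(lines) + "\n"
-- ===== SOURCE B (Python) =====
-- def format_env(env: dict[str, str]) -> str:
--     preferred_order = [
--         "MYSQL_ROOT_PASSWORD",
--         "APP_ADMIN_USERNAME",
--         "APP_ADMIN_PASSWORD",
--         "JAVA_TOOL_OPTIONS",
--         "APP_AUTH_FIXED_CODE_WHITELIST_PHONES",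
--         "APP_UPLOAD_DIR",
--         "EVLEASE_MYSQL_IMAGE",
--         "EVLEASE_NGINX_IMAGE",
--         "EVLEASE_JRE_IMAGE",
--     ]
--     rank = {name: i for i, name in enumerate(preferred_order)}
--     n = len(preferred_order)
--     keys = sorted(env, key=lambda k: (rank.get(k, n), k))
--     return "\n".join(f"{k}={env[k]}" for k in keys) + "\n"
-- ===== Notes on version B (the rewrite author's own statement) =====
-- stated objective: simpler
-- what changed: Replaces A's two passes (a preferred-order scan with a 'seen' set, then a scan over the alphabetically sorted remaining keys) by building a rank index once and doing a single sort of all keys under the composite key (rank.get(k, n), k), then one map/join.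
import Mathlib
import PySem

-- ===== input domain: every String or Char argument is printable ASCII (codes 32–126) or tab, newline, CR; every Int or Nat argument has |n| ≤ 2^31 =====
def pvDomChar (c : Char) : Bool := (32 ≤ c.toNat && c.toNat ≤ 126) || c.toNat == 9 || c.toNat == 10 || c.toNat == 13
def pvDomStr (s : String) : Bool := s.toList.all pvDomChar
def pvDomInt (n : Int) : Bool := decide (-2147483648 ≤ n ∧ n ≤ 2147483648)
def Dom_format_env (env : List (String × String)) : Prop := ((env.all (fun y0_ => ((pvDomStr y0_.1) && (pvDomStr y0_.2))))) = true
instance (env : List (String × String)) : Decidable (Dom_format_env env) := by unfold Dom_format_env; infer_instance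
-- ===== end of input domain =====

-- B replaces A's two passes (preferred scan + 'seen' set, then a scan of the sorted rest) by one
-- composite-key sort of all keys; objective: simpler.

-- the module-level preferred_order list, shared verbatim by both ports
def pvPreferredOrder : List String := [
  "MYSQL_ROOT_PASSWORD",
  "APP_ADMIN_USERNAME",
  "APP_ADMIN_PASSWORD",
  "JAVA_TOOL_OPTIONS",
  "APP_AUTH_FIXED_CODE_WHITELIST_PHONES",
  "APP_UPLOAD_DIR",
  "EVLEASE_MYSQL_IMAGE",
  "EVLEASE_NGINX_IMAGE",
  "EVLEASE_JRE_IMAGE"]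

-- ===== PORT A =====
-- env[k] is ported as getD k "" — exact because every lookup is guarded by 'k in env' / k being a key
def format_env (env : List (String × String)) : String :=
  let d := PySem.Dict.mk env
  let st := pvPreferredOrder.foldl
    (fun (st : List String × PySem.Set String) k =>
      if d.contains k then (st.1 ++ [k ++ "=" ++ d.getD k ""], st.2.add k) else st)
    ([], PySem.Set.ofList [])
  let lines := (PySem.List.sorted d.keys (fun x => x) false).foldl
    (fun acc k => if k ∈ st.2 then acc else acc ++ [k ++ "=" ++ d.getD k ""]) st.1
  PySem.Str.join "\n" lines ++ "\n"

-- ===== PORT B =====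
-- rank = {name: i for i, name in enumerate(preferred_order)}
def pvRank : PySem.Dict String Int :=
  (PySem.List.enumerate pvPreferredOrder).foldl
    (fun (r : PySem.Dict String Int) p => r.insert p.2 p.1) PySem.Dict.empty

def format_env_alt (env : List (String × String)) : String :=
  let d := PySem.Dict.mk env
  let n : Int := PySem.List.len pvPreferredOrder
  let keys := PySem.List.sorted2 d.keys (fun k => pvRank.getD k n) (fun k => k) false
  PySem.Str.join "\n" (keys.map (fun k => k ++ "=" ++ d.getD k "")) ++ "\n"

-- ===== PRECONDITION & SPEC =====
-- Pre_ excludes only association lists with duplicate keys: they do not represent any Python dict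
-- (A's parameter is dict[str, str], whose keys are unique), so no behaviour of A is excluded.
def Pre_format_env (env : List (String × String)) : Prop := (env.map Prod.fst).Nodup
instance (env : List (String × String)) : Decidable (Pre_format_env env) := by unfold Pre_format_env; infer_instance
def pvWitness_format_env : (List (String × String)) := [("PATH", "x"), ("APP_UPLOAD_DIR", "/srv")]

def Spec_format_env (env : List (String × String)) (out : String) : Prop := out = format_env_alt env
instance (env : List (String × String)) (out : String) : Decidable (Spec_format_env env out) := by unfold Spec_format_env; infer_instance

-- ===== CLAIM (what is proved, stated in full; the proofs are below) =====
def Claim_equal_format_env : Prop := ∀ (env : List (String × String)), Dom_format_env env → Pre_format_env env → Spec_format_env env (format_env env)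

-- ===== LEMMAS AND PROOFS =====

-- the line formatter both ports share
def pvFmt (d : PySem.Dict String String) (k : String) : String := k ++ "=" ++ d.getD k ""

-- A's key order, named: preferred keys present, then the remaining keys alphabetically
def pvP (d : PySem.Dict String String) : List String :=
  pvPreferredOrder.filter (fun k => d.contains k)
def pvR (ks : List String) : List String :=
  (PySem.List.sorted ks (fun x => x) false).filter (fun k => !decide (k ∈ pvPreferredOrder))

-- A's first loop: the lines are the preferred-present keys formatted …
lemma loop1_fst (d : PySem.Dict String String) :
    ∀ (l : List String) (acc : List String) (s : PySem.Set String),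
    (l.foldl (fun (st : List String × PySem.Set String) k =>
        if d.contains k then (st.1 ++ [k ++ "=" ++ d.getD k ""], st.2.add k) else st) (acc, s)).1
      = acc ++ (l.filter (fun k => d.contains k)).map (pvFmt d) := by
  intro l
  induction l with
  | nil => intro acc s; simp
  | cons x t ih =>
    intro acc s
    by_cases h : d.contains x
    · simp [List.foldl, h, ih, pvFmt]
    · simp [List.foldl, h, ih]

-- … and the 'seen' set holds exactly the preferred keys that are in env
lemma loop1_snd (d : PySem.Dict String String) :
    ∀ (l : List String) (acc : List String) (s : PySem.Set String) (k : String),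
    (k ∈ (l.foldl (fun (st : List String × PySem.Set String) k =>
        if d.contains k then (st.1 ++ [k ++ "=" ++ d.getD k ""], st.2.add k) else st) (acc, s)).2)
      ↔ (k ∈ s ∨ (k ∈ l ∧ d.contains k = true)) := by
  intro l
  induction l with
  | nil => intro acc s k; simp
  | cons x t ih =>
    intro acc s k
    by_cases h : d.contains x
    · simp only [List.foldl, if_pos h, ih, PySem.Set.mem_add, List.mem_cons]
      constructor
      · rintro ((hs | rfl) | ht)
        · exact Or.inl hs
        · exact Or.inr ⟨Or.inl rfl, h⟩
        · exact Or.inr ⟨Or.inr ht.1, ht.2⟩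
      · rintro (hs | ⟨(rfl | ht), hc⟩)
        · exact Or.inl (Or.inl hs)
        · exact Or.inl (Or.inr rfl)
        · exact Or.inr ⟨ht, hc⟩
    · simp only [List.foldl, if_neg h, ih, List.mem_cons]
      constructor
      · rintro (hs | ht)
        · exact Or.inl hs
        · exact Or.inr ⟨Or.inr ht.1, ht.2⟩
      · rintro (hs | ⟨(rfl | ht), hc⟩)
        · exact Or.inl hs
        · exact absurd hc (by simpa using h)
        · exact Or.inr ⟨ht, hc⟩

-- A's second loop: skip-if-seen is append-filter
lemma loop2_skip (P : String → Prop) [DecidablePred P] (f : String → String) :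
    ∀ (l : List String) (acc : List String),
    (l.foldl (fun acc k => if P k then acc else acc ++ [f k]) acc)
      = acc ++ (l.filter (fun k => !decide (P k))).map f := by
  intro l
  induction l with
  | nil => intro acc; simp
  | cons x t ih =>
    intro acc
    by_cases h : P x
    · simp [List.foldl, h, ih]
    · simp [List.foldl, h, ih]

-- sorted2 with an Int first key and the identity second key IS sorted under the lexicographic key
lemma sorted2_eq_sorted_lex (xs : List String) (k1 : String → Int) :
    PySem.List.sorted2 xs k1 (fun k => k) false
      = PySem.List.sorted xs (fun k => toLex (k1 k, k)) false := by
  have hfun : (fun a b : String => decide (k1 a < k1 b) || (!decide (k1 b < k1 a) && decide (a < b)))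
      = fun a b : String => decide (toLex (k1 a, a) < toLex (k1 b, b)) := by
    funext a b
    rcases lt_trichotomy (k1 a) (k1 b) with h | h | h
    · simp [Prod.Lex.lt_iff, h]
    · simp [Prod.Lex.lt_iff, h]
    · simp [Prod.Lex.lt_iff, not_lt.mpr h.le, h, ne_of_gt h]
  show List.foldl _ [] xs = List.foldl _ [] xs
  rw [hfun]

lemma rank_getD_not_mem (k : String) (h : k ∉ pvPreferredOrder) : pvRank.getD k 9 = 9 := by
  have hmk : pvRank = PySem.Dict.mk [
    ("MYSQL_ROOT_PASSWORD", 0), ("APP_ADMIN_USERNAME", 1), ("APP_ADMIN_PASSWORD", 2),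
    ("JAVA_TOOL_OPTIONS", 3), ("APP_AUTH_FIXED_CODE_WHITELIST_PHONES", 4), ("APP_UPLOAD_DIR", 5),
    ("EVLEASE_MYSQL_IMAGE", 6), ("EVLEASE_NGINX_IMAGE", 7), ("EVLEASE_JRE_IMAGE", 8)] := by decide
  simp only [pvPreferredOrder, List.mem_cons, not_or] at h
  obtain ⟨h1, h2, h3, h4, h5, h6, h7, h8, h9, -⟩ := h
  simp [hmk, PySem.Dict.getD, PySem.Dict.get?,
    Ne.symm h1, Ne.symm h2, Ne.symm h3, Ne.symm h4, Ne.symm h5,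
    Ne.symm h6, Ne.symm h7, Ne.symm h8, Ne.symm h9]

lemma rank_lt_of_mem : ∀ a ∈ pvPreferredOrder, pvRank.getD a 9 < 9 := by decide

-- the sorted-key sequence of B equals A's key sequence
lemma keys_eq (env : List (String × String)) (hnd : (env.map Prod.fst).Nodup) :
    PySem.List.sorted2 (env.map Prod.fst)
        (fun k => pvRank.getD k 9) (fun k => k) false
      = pvP (PySem.Dict.mk env) ++ pvR (env.map Prod.fst) := by
  set d := PySem.Dict.mk env with hd
  set ks := env.map Prod.fst with hks
  rw [sorted2_eq_sorted_lex]
  apply PySem.List.sorted_eq_of_perm_of_pairwise_lt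
  · -- permutation
    have hperm := List.filter_append_perm (fun k => decide (k ∈ pvPreferredOrder)) ks
    refine List.Perm.trans (List.Perm.append ?_ ?_) hperm
    · -- pvP d ~ ks.filter (· ∈ pvPreferredOrder)
      have h1 : (pvP d).Nodup := by
        unfold pvP; exact List.Nodup.filter _ (by decide)
      have h2 : (ks.filter (fun k => decide (k ∈ pvPreferredOrder))).Nodup :=
        List.Nodup.filter _ hnd
      rw [List.perm_ext_iff_of_nodup h1 h2]
      intro a
      simp only [pvP, List.mem_filter, decide_eq_true_eq]
      constructor
      · rintro ⟨hp, hc⟩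
        refine ⟨?_, hp⟩
        have := (PySem.Dict.contains_iff_mem_keys (d := d) (k := a)).mp hc
        simpa [hd, hks] using this
      · rintro ⟨hk, hp⟩
        refine ⟨hp, ?_⟩
        apply (PySem.Dict.contains_iff_mem_keys (d := d) (k := a)).mpr
        simpa [hd, hks] using hk
    · -- pvR ks ~ ks.filter (· ∉ pvPreferredOrder)
      exact List.Perm.filter _ (PySem.List.sorted_perm ks (fun x => x) false)
  · -- strictly increasing under the lexicographic key
    rw [List.pairwise_append]
    refine ⟨?_, ?_, ?_⟩
    · -- within pvP: ranks strictly increase along preferred_order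
      have hp : pvPreferredOrder.Pairwise
          (fun a b => pvRank.getD a 9 < pvRank.getD b 9) := by decide
      have := hp.sublist (List.filter_sublist (l := pvPreferredOrder) (p := fun k => d.contains k))
      exact this.imp (fun h => by simp [Prod.Lex.lt_iff]; exact Or.inl h)
    · -- within pvR: all ranks are 9, names strictly increase
      have hle : (pvR ks).Pairwise (fun a b : String => a ≤ b) :=
        (PySem.List.sorted_pairwise ks (fun x => x)).sublist
          (List.filter_sublist (l := PySem.List.sorted ks (fun x => x) false))
      have hndS : (pvR ks).Nodup :=
        List.Nodup.filter _ ((PySem.List.sorted_perm ks (fun x => x) false).nodup_iff.mpr hnd)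
      have hlt := (hle.and hndS).imp
        (fun h => lt_of_le_of_ne h.1 h.2)
      refine hlt.imp_of_mem ?_
      intro a b ha hb h
      have hna : a ∉ pvPreferredOrder := by
        have := List.of_mem_filter ha; simpa using this
      have hnb : b ∉ pvPreferredOrder := by
        have := List.of_mem_filter hb; simpa using this
      simp [Prod.Lex.lt_iff, rank_getD_not_mem a hna, rank_getD_not_mem b hnb]
      exact String.lt_iff_toList_lt.mp h
    · -- across: preferred before the rest
      intro a ha b hb
      have hpa : a ∈ pvPreferredOrder := List.mem_of_mem_filter ha
      have hnb : b ∉ pvPreferredOrder := by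
        have := List.of_mem_filter hb; simpa using this
      have h9a : pvRank.getD a 9 < 9 := rank_lt_of_mem a hpa
      simp [Prod.Lex.lt_iff, rank_getD_not_mem b hnb]
      exact Or.inl h9a

-- ===== VERDICT (by name: the statement is the Claim_ definition above) =====
theorem format_env_spec : Claim_equal_format_env := by
  intro env _hdom hpre
  unfold Spec_format_env format_env format_env_alt
  simp only [PySem.Dict.keys_mk]
  set d := PySem.Dict.mk env with hd
  set ks := env.map Prod.fst with hks
  have hnd : ks.Nodup := hpre
  -- A's first loop
  rw [loop1_fst d pvPreferredOrder [] (PySem.Set.ofList [])]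
  -- A's second loop
  rw [loop2_skip _ _ (PySem.List.sorted ks (fun x => x) false)]
  -- the skipped keys are exactly the preferred ones
  have hfil :
      (PySem.List.sorted ks (fun x => x) false).filter
        (fun k => !decide (k ∈ (pvPreferredOrder.foldl (fun (st : List String × PySem.Set String) k =>
            if d.contains k then (st.1 ++ [k ++ "=" ++ d.getD k ""], st.2.add k) else st)
            ([], PySem.Set.ofList [])).2))
        = pvR ks := by
    apply List.filter_congr
    intro k hk
    have hkks : k ∈ ks := by
      exact (PySem.List.mem_sorted ks (fun x => x) false k).mp hk
    have hc : d.contains k = true := by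
      apply (PySem.Dict.contains_iff_mem_keys (d := d) (k := k)).mpr
      simpa [hd, hks] using hkks
    simp only [loop1_snd d, PySem.Set.mem_ofList, List.not_mem_nil, false_or]
    simp [hc]
  rw [hfil]
  have hn9 : PySem.List.len pvPreferredOrder = (9 : Int) := by decide
  rw [hn9, keys_eq env hnd, List.map_append]
  rfl
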